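-- pv_equiv track=rewrite | github.com/Asichurter/vul-code-analyzer | pretrain/eval/eval_partial_pdg_on_neuralpda_data.py | split_code_lines
-- ===== SOURCE A (Python) =====
-- def split_code_lines(code: str, n_line: int):
--     code_lines = code.split("\n")
--     code_snippets = []
--     for i in range(len(code_lines)-n_line):
--         snippet = '\n'.join(code_lines[i:i + n_line])
--         # Fix the case where last line of snippet is empty, making line count going wrong
--         if code_lines[i+n_line-1] == '':
--             snippet += '\n'
--         code_snippets.append(snippet)
--     return code_snippets
-- ===== SOURCE B (Python) =====
-- def split_code_lines(code: str, n_line: int):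
--     # Offset-table variant: precompute each line's start offset in `code`,
--     # then cut every snippet directly out of `code` as one substring.
--     lines = code.split("\n")
--     offsets = [0]
--     for ln in lines:
--         offsets.append(offsets[-1] + len(ln) + 1)
--     snippets = []
--     for i in range(len(lines) - n_line):
--         end = offsets[i + n_line]
--         snippet = code[offsets[i]:end - 1]
--         if end - offsets[i + n_line - 1] == 1:  # window's last line is empty
--             snippet += '\n'
--         snippets.append(snippet)
--     return snippets
-- ===== Notes on version B (the rewrite author's own statement) =====
-- stated objective: alternative
-- what changed: B precomputes a table of each line's start offset in `code` and cuts every snippet directly out of `code` as one substring (with the empty-last-line check done by offset arithmetic), instead of A's per-window list slice plus ' '.join.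
-- outside the precondition, e.g. on split_code_lines('a\nb', 0): A returns ['', ''], B returns ['a\n', '']; on split_code_lines('a\nb', -1): A returns ['a', '', ''], B returns ['a\nb', '', '']
import Mathlib
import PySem

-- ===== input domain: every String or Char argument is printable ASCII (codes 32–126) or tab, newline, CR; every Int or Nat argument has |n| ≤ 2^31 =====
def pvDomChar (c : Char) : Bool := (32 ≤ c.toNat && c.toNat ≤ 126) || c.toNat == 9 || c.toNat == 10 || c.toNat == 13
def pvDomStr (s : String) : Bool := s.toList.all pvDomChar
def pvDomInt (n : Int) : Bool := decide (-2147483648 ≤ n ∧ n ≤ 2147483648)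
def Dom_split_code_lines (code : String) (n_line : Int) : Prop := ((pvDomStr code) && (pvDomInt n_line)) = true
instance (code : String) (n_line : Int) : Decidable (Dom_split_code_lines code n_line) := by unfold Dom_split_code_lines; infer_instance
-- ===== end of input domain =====

-- B replaces the per-window slice-and-join by a precomputed table of line start
-- offsets and cuts each snippet directly out of `code` (objective: alternative).

-- ===== PORT A =====
def split_code_lines (code : String) (n_line : Int) : List String :=
  let code_lines := PySem.Chars.splitOn code.toList ['\n']
  (PySem.List.pyRange 0 ((code_lines.length : Int) - n_line) 1).foldl
    (fun acc i =>
      let snippet := PySem.Chars.join ['\n'] (PySem.List.slice code_lines (some i) (some (i + n_line)))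
      let snippet := if PySem.List.pyGet? code_lines (i + n_line - 1) == some ([] : List Char)
                     then snippet ++ ['\n'] else snippet
      acc ++ [String.ofList snippet]) []

-- ===== PORT B =====
def split_code_lines_alt (code : String) (n_line : Int) : List String :=
  let cs := code.toList
  let lines := PySem.Chars.splitOn cs ['\n']
  let offsets := lines.foldl (fun os ln => os ++ [os.getLastD 0 + (ln.length : Int) + 1]) ([0] : List Int)
  (PySem.List.pyRange 0 ((lines.length : Int) - n_line) 1).foldl
    (fun acc i =>
      let e := (PySem.List.pyGet? offsets (i + n_line)).getD 0
      let snippet := PySem.List.slice cs (some ((PySem.List.pyGet? offsets i).getD 0)) (some (e - 1))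
      let snippet := if e - (PySem.List.pyGet? offsets (i + n_line - 1)).getD 0 == 1
                     then snippet ++ ['\n'] else snippet
      acc ++ [String.ofList snippet]) []

-- ===== PRECONDITION & SPEC =====
-- Pre_ restricts to the natural domain of a positive window size: for n_line ≤ 0 the
-- window lines[i:i+n_line] is empty and A's values there (empty-slice joins plus the
-- negative-index wraparound in the empty-line check) are accidental.
def Pre_split_code_lines (code : String) (n_line : Int) : Prop := 1 ≤ n_line
instance (code : String) (n_line : Int) : Decidable (Pre_split_code_lines code n_line) := by unfold Pre_split_code_lines; infer_instance
def pvWitness_split_code_lines : String × Int := ("a\nb\n\nc", 2)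

def Spec_split_code_lines (code : String) (n_line : Int) (out : List String) : Prop := out = split_code_lines_alt code n_line
instance (code : String) (n_line : Int) (out : List String) : Decidable (Spec_split_code_lines code n_line out) := by unfold Spec_split_code_lines; infer_instance

-- ===== CLAIM (what is proved, stated in full; the proofs are below) =====
def Claim_equal_split_code_lines : Prop := ∀ (code : String) (n_line : Int), Dom_split_code_lines code n_line → Pre_split_code_lines code n_line → Spec_split_code_lines code n_line (split_code_lines code n_line)

-- ===== LEMMAS AND PROOFS =====

-- reference split: what `code.split("\n")` produces, structurally
def splitNl : List Char → List (List Char)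
  | [] => [[]]
  | a :: rest => if a = '\n' then [] :: splitNl rest else (splitNl rest).modifyHead (a :: ·)

-- reference join: '\n'.join, structurally
def nlJoin : List (List Char) → List Char
  | [] => []
  | [a] => a
  | a :: b :: rest => a ++ '\n' :: nlJoin (b :: rest)

-- cumulative start offsets: pref ls k = start offset of line k in the joined text
def pref (ls : List (List Char)) (k : Nat) : Nat := ((ls.take k).map (fun l => l.length + 1)).sum

-- B's offset table, structurally
def offs (c0 : Int) : List (List Char) → List Int
  | [] => [c0]
  | l :: rest => c0 :: offs (c0 + l.length + 1) rest

theorem splitNl_ne_nil (s : List Char) : splitNl s ≠ [] := by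
  induction s with
  | nil => simp [splitNl]
  | cons a rest ih =>
    simp only [splitNl]
    split
    · simp
    · cases h : splitNl rest with
      | nil => exact absurd h ih
      | cons x xs => simp

theorem nlJoin_modifyHead (a : Char) (ls : List (List Char)) (h : ls ≠ []) :
    nlJoin (ls.modifyHead (a :: ·)) = a :: nlJoin ls := by
  match ls with
  | [] => simp at h
  | [x] => simp [nlJoin]
  | x :: y :: rest => simp [nlJoin]

theorem join_splitNl (s : List Char) : nlJoin (splitNl s) = s := by
  induction s with
  | nil => simp [splitNl, nlJoin]
  | cons a rest ih =>
    simp only [splitNl]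
    split
    · rename_i ha
      cases h : splitNl rest with
      | nil => exact absurd h (splitNl_ne_nil rest)
      | cons x xs => rw [h] at ih; simp [nlJoin, ← ih, ha]
    · rw [nlJoin_modifyHead a _ (splitNl_ne_nil rest), ih]

theorem join_eq (ls : List (List Char)) : PySem.Chars.join ['\n'] ls = nlJoin ls := by
  match ls with
  | [] => simp [PySem.Chars.join, List.intercalate, nlJoin]
  | [a] => simp [PySem.Chars.join, List.intercalate, nlJoin]
  | a :: b :: rest =>
    have ih := join_eq (b :: rest)
    simp only [PySem.Chars.join, List.intercalate] at *
    simp [nlJoin, ← ih]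

theorem modifyHead_nil_append (ls : List (List Char)) (h : ls ≠ []) :
    ls.modifyHead (fun x => [] ++ x) = ls := by
  match ls with
  | x :: t => simp

theorem go_eq (fuel : Nat) : ∀ (l cur : List Char) (acc : List (List Char)), l.length < fuel →
    PySem.Chars.splitOn.go ['\n'] fuel l cur acc
      = acc.reverse ++ (splitNl l).modifyHead (cur.reverse ++ ·) := by
  induction fuel with
  | zero => intro l cur acc h; omega
  | succ f ih =>
    intro l cur acc h
    match l with
    | [] =>
      show (cur.reverse :: acc).reverse = _
      simp [splitNl]
    | c :: rest =>
      show (if ['\n'].isPrefixOf (c :: rest) then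
              PySem.Chars.splitOn.go ['\n'] f (List.drop 1 (c :: rest)) [] (cur.reverse :: acc)
            else PySem.Chars.splitOn.go ['\n'] f rest (c :: cur) acc) = _
      by_cases hc : c = '\n'
      · have hpre : ['\n'].isPrefixOf (c :: rest) = true := by simp [List.isPrefixOf, hc]
        rw [if_pos hpre]
        simp only [List.drop_succ_cons, List.drop_zero]
        rw [ih rest [] (cur.reverse :: acc) (by simpa using h)]
        simp only [splitNl, if_pos hc, List.reverse_cons, List.reverse_nil, List.nil_append,
          List.modifyHead_cons, List.drop_succ_cons, List.drop_zero]
        simp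
        cases hs : splitNl rest with
        | nil => exact absurd hs (splitNl_ne_nil rest)
        | cons x xs => simp
      · have hpre : ['\n'].isPrefixOf (c :: rest) = false := by
          simp [List.isPrefixOf]; exact fun hh => absurd hh.symm hc
        rw [if_neg (by simp [hpre])]
        rw [ih rest (c :: cur) acc (by simpa using h)]
        simp only [splitNl, if_neg hc]
        cases hs : splitNl rest with
        | nil => exact absurd hs (splitNl_ne_nil rest)
        | cons x xs => simp

theorem splitOn_eq (s : List Char) : PySem.Chars.splitOn s ['\n'] = splitNl s := by
  show PySem.Chars.splitOn.go ['\n'] (s.length + 1) s [] [] = _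
  rw [go_eq (s.length + 1) s [] [] (by omega)]
  simp only [List.reverse_nil, List.nil_append]
  exact modifyHead_nil_append _ (splitNl_ne_nil s)

theorem dropLast_append_getLastD (os : List Int) (h : os ≠ []) :
    os.dropLast ++ [os.getLastD 0] = os := by
  match os with
  | [x] => simp
  | x :: y :: t =>
    have := dropLast_append_getLastD (y :: t) (by simp)
    simpa using this

theorem offs_build (ls : List (List Char)) : ∀ (os : List Int), os ≠ [] →
    ls.foldl (fun os ln => os ++ [os.getLastD 0 + (ln.length : Int) + 1]) os
      = os.dropLast ++ offs (os.getLastD 0) ls := by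
  induction ls with
  | nil => intro os h; simpa [offs] using (dropLast_append_getLastD os h).symm
  | cons l rest ih =>
    intro os h
    simp only [List.foldl_cons]
    rw [ih (os ++ [os.getLastD 0 + l.length + 1]) (by simp)]
    simp only [List.dropLast_concat, List.getLastD_concat, offs]
    rw [show os.dropLast ++ os.getLastD 0 :: offs (os.getLastD 0 + ↑l.length + 1) rest
          = (os.dropLast ++ [os.getLastD 0]) ++ offs (os.getLastD 0 + ↑l.length + 1) rest by simp]
    rw [dropLast_append_getLastD os h]
theorem pref_succ (ls : List (List Char)) (k : Nat) (h : k < ls.length) :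
    pref ls (k + 1) = pref ls k + (ls[k].length + 1) := by
  simp only [pref, List.take_add_one, List.getElem?_eq_getElem h, Option.toList_some,
    List.map_append, List.sum_append, List.map_cons, List.map_nil, List.sum_cons, List.sum_nil]
  omega

theorem offs_get (ls : List (List Char)) (c0 : Int) (k : Nat) (h : k ≤ ls.length) :
    (offs c0 ls)[k]? = some (c0 + pref ls k) := by
  induction ls generalizing c0 k with
  | nil =>
    simp only [List.length_nil, Nat.le_zero] at h
    subst h; simp [offs, pref]
  | cons l rest ih =>
    cases k with
    | zero => simp [offs, pref]
    | succ j =>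
      simp only [offs, List.getElem?_cons_succ]
      rw [ih _ j (by simpa using h)]
      simp [pref, List.take_succ_cons]
      ring

theorem nlJoin_drop (ls : List (List Char)) (k : Nat) (h : k < ls.length) :
    (nlJoin ls).drop (pref ls k) = nlJoin (ls.drop k) := by
  induction k generalizing ls with
  | zero => simp [pref]
  | succ j ih =>
    match ls with
    | a :: rest =>
      have hr : rest ≠ [] := by
        intro hn; subst hn; simp at h
      match rest, hr with
      | b :: rest', _ =>
        have hp : pref (a :: b :: rest') (j + 1) = a.length + (1 + pref (b :: rest') j) := by
          simp [pref, List.take_succ_cons]; ring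
        rw [hp]
        show ((a ++ '\n' :: nlJoin (b :: rest')).drop (a.length + (1 + pref (b :: rest') j))) = _
        rw [List.drop_length_add_append]
        simp only [List.drop_succ_cons, Nat.add_comm 1 (pref (b :: rest') j)]
        exact ih (b :: rest') (by simp at h ⊢; omega)

theorem nlJoin_take (n : Nat) (ls : List (List Char)) (h1 : 1 ≤ n) (h2 : n ≤ ls.length) :
    (nlJoin ls).take (pref ls n - 1) = nlJoin (ls.take n) := by
  induction n generalizing ls with
  | zero => omega
  | succ m ih =>
    match ls with
    | a :: rest =>
      cases m with
      | zero =>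
        have hp : pref (a :: rest) 1 = a.length + 1 := by simp [pref]
        rw [hp]
        match rest with
        | [] => simp [nlJoin]
        | b :: rest' =>
          show (a ++ '\n' :: nlJoin (b :: rest')).take (a.length + 1 - 1) = nlJoin [a]
          simp [nlJoin, List.take_length_add_append 0 (l₁ := a)]
      | succ m' =>
        have hr : rest ≠ [] := by intro hn; subst hn; simp at h2
        match rest, hr with
        | b :: rest', _ =>
          have hpos : 1 ≤ pref (b :: rest') (m' + 1) := by
            simp [pref, List.take_succ_cons]; omega
          have hp : pref (a :: b :: rest') (m' + 1 + 1) - 1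
              = a.length + (1 + (pref (b :: rest') (m' + 1) - 1)) := by
            simp [pref, List.take_succ_cons] at *; omega
          rw [hp]
          show (a ++ '\n' :: nlJoin (b :: rest')).take _ = _
          rw [List.take_length_add_append, Nat.add_comm 1 (pref (b :: rest') (m' + 1) - 1)]
          simp only [List.take_succ_cons]
          rw [ih (b :: rest') (by omega) (by simp at h2 ⊢; omega)]
          simp only [List.take_succ_cons, nlJoin]

-- ===== VERDICT (by name: the statement is the Claim_ definition above) =====
theorem pref_add (ls : List (List Char)) (i n : Nat) :
    pref ls (i + n) = pref ls i + pref (ls.drop i) n := by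
  induction ls generalizing i n with
  | nil => simp [pref]
  | cons l rest ih =>
    cases i with
    | zero => simp [pref]
    | succ j => simp only [Nat.succ_add, pref, List.take_succ_cons, List.map_cons, List.sum_cons,
        List.drop_succ_cons] at *; rw [ih]; ring

theorem pref_pos (ls : List (List Char)) (n : Nat) (h1 : 1 ≤ n) (h2 : ls ≠ []) : 1 ≤ pref ls n := by
  match ls, n with
  | l :: rest, n + 1 => simp [pref, List.take_succ_cons]; omega

theorem pyGet_offs (lines : List (List Char)) (k : Nat) (h : k ≤ lines.length) :
    PySem.List.pyGet? (offs 0 lines) (k : Int) = some ((pref lines k : Nat) : Int) := by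
  rw [PySem.List.pyGet?_natCast, offs_get lines 0 k h]
  simp

theorem snippet_eq (cs : List Char) (k m : Nat) (hm : 1 ≤ m)
    (hkm : k + m < (splitNl cs).length) :
    (fun i =>
      let snippet := PySem.Chars.join ['\n'] (PySem.List.slice (splitNl cs) (some i) (some (i + (m : Int))))
      let snippet := if PySem.List.pyGet? (splitNl cs) (i + (m : Int) - 1) == some ([] : List Char)
                     then snippet ++ ['\n'] else snippet
      String.ofList snippet) ((k : Nat) : Int)
    = (fun i =>
      let e := (PySem.List.pyGet? (offs 0 (splitNl cs)) (i + (m : Int))).getD 0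
      let snippet := PySem.List.slice cs (some ((PySem.List.pyGet? (offs 0 (splitNl cs)) i).getD 0)) (some (e - 1))
      let snippet := if e - (PySem.List.pyGet? (offs 0 (splitNl cs)) (i + (m : Int) - 1)).getD 0 == 1
                     then snippet ++ ['\n'] else snippet
      String.ofList snippet) ((k : Nat) : Int) := by
  simp only []
  set lines := splitNl cs with hl
  have hL : k + m ≤ lines.length := le_of_lt hkm
  have hcast1 : ((k : Int) + (m : Int)) = ((k + m : Nat) : Int) := by push_cast; ring
  have hcast2 : ((k : Int) + (m : Int) - 1) = ((k + m - 1 : Nat) : Int) := by push_cast; omega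
  rw [hcast2, hcast1]
  rw [pyGet_offs lines (k + m) hL, pyGet_offs lines (k + m - 1) (by omega)]
  rw [pyGet_offs lines k (by omega)]
  simp only [Option.getD_some]
  -- the snippet bodies agree
  have hidx : k + m - 1 < lines.length := by omega
  have hps : pref lines (k + m) = pref lines (k + m - 1) + (lines[k + m - 1].length + 1) := by
    have := pref_succ lines (k + m - 1) hidx
    rwa [show k + m - 1 + 1 = k + m by omega] at this
  have hcond : (PySem.List.pyGet? lines ((k + m - 1 : Nat) : Int) == some ([] : List Char))
      = (((pref lines (k + m) : Nat) : Int) - ((pref lines (k + m - 1) : Nat) : Int) == (1 : Int)) := by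
    rw [PySem.List.pyGet?_natCast, List.getElem?_eq_getElem hidx]
    by_cases hemp : lines[k + m - 1] = []
    · have h1 : (some lines[k + m - 1] == some ([] : List Char)) = true := by simp [hemp]
      have h2 : (((pref lines (k + m) : Nat) : Int) - ((pref lines (k + m - 1) : Nat) : Int) == (1 : Int)) = true := by
        rw [beq_iff_eq]; rw [hps, hemp]; push_cast; simp
      rw [h1, h2]
    · have h1 : (some lines[k + m - 1] == some ([] : List Char)) = false := by simpa using hemp
      have h2 : (((pref lines (k + m) : Nat) : Int) - ((pref lines (k + m - 1) : Nat) : Int) == (1 : Int)) = false := by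
        rw [beq_eq_false_iff_ne]
        have : lines[k + m - 1].length ≠ 0 := by simpa using hemp
        rw [hps]; push_cast; omega
      rw [h1, h2]
  rw [hcond]
  -- the two snippet texts agree
  have hpos : 1 ≤ pref (lines.drop k) m :=
    pref_pos (lines.drop k) m hm (by intro hn; have := congrArg List.length hn; simp at this; omega)
  have hsplit : pref lines (k + m) = pref lines k + pref (lines.drop k) m := pref_add lines k m
  have htext : PySem.Chars.join ['\n'] (PySem.List.slice lines (some ((k : Nat) : Int)) (some ((k + m : Nat) : Int)))
      = PySem.List.slice cs (some ((pref lines k : Nat) : Int)) (some (((pref lines (k + m) : Nat) : Int) - 1)) := by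
    rw [PySem.List.slice_natCast, join_eq]
    rw [show (((pref lines (k + m) : Nat) : Int) - 1) = ((pref lines (k + m) - 1 : Nat) : Int) by
      have : 1 ≤ pref lines (k + m) := by omega
      push_cast [this]; omega]
    rw [PySem.List.slice_natCast]
    rw [show cs = nlJoin lines from (join_splitNl cs).symm]
    rw [nlJoin_drop lines k (by omega)]
    rw [show pref lines (k + m) - 1 - pref lines k = pref (lines.drop k) m - 1 by omega]
    rw [nlJoin_take m (lines.drop k) hm (by simp; omega)]
    rw [show k + m - k = m by omega]
  rw [htext]

theorem split_code_lines_spec : Claim_equal_split_code_lines := by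
  intro code n_line _ hpre
  show split_code_lines code n_line = split_code_lines_alt code n_line
  have hpre' : 1 ≤ n_line := hpre
  obtain ⟨m, rfl⟩ : ∃ m : Nat, n_line = (m : Int) :=
    ⟨n_line.toNat, (Int.toNat_of_nonneg (by omega)).symm⟩
  have hm : 1 ≤ m := by exact_mod_cast hpre'
  unfold split_code_lines split_code_lines_alt
  simp only [splitOn_eq]
  rw [offs_build (splitNl code.toList) [0] (by simp)]
  simp only [List.dropLast_singleton, List.getLastD, List.nil_append]
  rw [PySem.List.foldl_append_singleton_eq_map, PySem.List.foldl_append_singleton_eq_map]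
  simp only [List.nil_append]
  apply List.map_congr_left
  intro i hi
  rw [PySem.List.mem_pyRange_one] at hi
  obtain ⟨h0, hlt⟩ := hi
  obtain ⟨k, rfl⟩ : ∃ k : Nat, i = (k : Int) := ⟨i.toNat, (Int.toNat_of_nonneg h0).symm⟩
  have hkm : k + m < (splitNl code.toList).length := by
    have := hlt; push_cast at this; omega
  exact snippet_eq code.toList k m hm hkm
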